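-- pv_equiv track=rewrite | github.com/tmkeil/API_Agent | windchill-api/src/services/write_service.py | _parse_downstream_entries
-- ===== SOURCE A (Python) =====
-- def _parse_downstream_entries(value: str) -> list[dict[str, str]]:
--     """Parse BALDOWNSTREAM into structured entries.
--
--     BALDOWNSTREAM format:
--       "NUMBER, NAME, ORG, VERSION (VIEW), NUMBER, NAME, ORG, VERSION (VIEW), ..."
--     Each entry is a group of 4 comma-separated tokens.
--     Returns list of dicts with keys: number, name, organization, versionView.
--     """
--     if not value or value.startswith("<list:0"):
--         return []
--
--     parts = [s.strip() for s in value.split(",")]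
--     entries: list[dict[str, str]] = []
--     i = 0
--     while i + 3 < len(parts):
--         entries.append({
--             "number": parts[i],
--             "name": parts[i + 1],
--             "organization": parts[i + 2],
--             "versionView": parts[i + 3],
--         })
--         i += 4
--     return entries
-- ===== SOURCE B (Python) =====
-- def _parse_downstream_entries(value: str) -> list[dict[str, str]]:
--     if not value or value.startswith("<list:0"):
--         return []
--     parts = [s.strip() for s in value.split(",")]
--     return [
--         {"number": n, "name": nm, "organization": org, "versionView": vv}
--         for n, nm, org, vv in zip(parts[0::4], parts[1::4], parts[2::4], parts[3::4])
--     ]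
-- ===== Notes on version B (the rewrite author's own statement) =====
-- stated objective: alternative
-- what changed: Instead of walking an index four steps at a time and reading parts[i..i+3], B builds the four fields columnwise with extended slices parts[0::4]..parts[3::4] and transposes the columns with zip (the shortest column, parts[3::4], drops any incomplete tail group).
import Mathlib
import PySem

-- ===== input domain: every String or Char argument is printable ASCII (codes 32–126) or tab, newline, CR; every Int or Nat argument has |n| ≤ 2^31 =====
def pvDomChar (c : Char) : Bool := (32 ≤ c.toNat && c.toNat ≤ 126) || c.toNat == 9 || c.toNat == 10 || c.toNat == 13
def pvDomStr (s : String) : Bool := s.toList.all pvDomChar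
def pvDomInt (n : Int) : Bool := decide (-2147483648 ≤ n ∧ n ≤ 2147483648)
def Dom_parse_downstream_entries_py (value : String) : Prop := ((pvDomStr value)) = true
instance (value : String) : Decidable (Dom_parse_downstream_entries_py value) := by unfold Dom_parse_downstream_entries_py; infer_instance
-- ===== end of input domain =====

-- ===== PORT A =====
-- B replaces A's index-advancing while loop by a columnar strategy: the four fields are
-- extracted as stride-4 slices parts[0::4]..parts[3::4] and transposed with zip; same O(n) cost.

-- while i + 3 < len(parts): append dict of parts[i..i+3]; i += 4   (indices are in range under the guard, so getD is exact)
def pvALoop (parts : List String) (i : Nat) (acc : List (List (String × String))) :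
    List (List (String × String)) :=
  if i + 3 < parts.length then
    pvALoop parts (i + 4)
      (acc ++ [[("number", parts.getD i ""), ("name", parts.getD (i + 1) ""),
                ("organization", parts.getD (i + 2) ""), ("versionView", parts.getD (i + 3) "")]])
  else acc
termination_by parts.length - i

-- value.split(",") with sep "," ≠ "" never raises: split? is always some, getD [] is exact
def parse_downstream_entries_py (value : String) : List (List (String × String)) :=
  if value = "" ∨ PySem.Str.startswith value "<list:0" then []
  else
    pvALoop (((PySem.Str.split? value ",").getD []).map PySem.Str.strip) 0 []

-- ===== PORT B =====
-- parts[k::4]: stride-4 extended slice; step 4 ≠ 0, so slice? never raises and getD [] is exact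
def pvCol (parts : List String) (k : Int) : List String :=
  (PySem.List.slice? parts (some k) none 4).getD []

-- zip(c0, c1, c2, c3): truncate at the shortest column
def pvZip4 {α : Type} : List α → List α → List α → List α → List (α × α × α × α)
  | x :: xs, y :: ys, z :: zs, w :: ws => (x, y, z, w) :: pvZip4 xs ys zs ws
  | _, _, _, _ => []

def parse_downstream_entries_py_alt (value : String) : List (List (String × String)) :=
  if value = "" ∨ PySem.Str.startswith value "<list:0" then []
  else
    let parts := ((PySem.Str.split? value ",").getD []).map PySem.Str.strip
    (pvZip4 (pvCol parts 0) (pvCol parts 1) (pvCol parts 2) (pvCol parts 3)).map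
      (fun t => [("number", t.1), ("name", t.2.1), ("organization", t.2.2.1), ("versionView", t.2.2.2)])

-- ===== PRECONDITION & SPEC =====
-- Python A never raises: its only raising primitive is str.split, and a one-character separator is nonempty,
-- so Pre_ is exactly that no-raise condition — it holds for EVERY string and excludes nothing.
def Pre_parse_downstream_entries_py (value : String) : Prop :=
  PySem.Str.split? value "," ≠ none
instance (value : String) : Decidable (Pre_parse_downstream_entries_py value) := by unfold Pre_parse_downstream_entries_py; infer_instance
def pvWitness_parse_downstream_entries_py : String := "n1, Part A, OrgX, 1.2 (Design)"

def Spec_parse_downstream_entries_py (value : String) (out : List (List (String × String))) : Prop := out = parse_downstream_entries_py_alt value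
instance (value : String) (out : List (List (String × String))) : Decidable (Spec_parse_downstream_entries_py value out) := by unfold Spec_parse_downstream_entries_py; infer_instance

-- ===== CLAIM (what is proved, stated in full; the proofs are below) =====
def Claim_equal_parse_downstream_entries_py : Prop := ∀ (value : String), Dom_parse_downstream_entries_py value → Pre_parse_downstream_entries_py value → Spec_parse_downstream_entries_py value (parse_downstream_entries_py value)

-- ===== LEMMAS AND PROOFS =====

-- proof-side view of a stride-4 slice: first element, then every fourth
def pvStride {α : Type} : List α → List α
  | x :: _ :: _ :: _ :: rest => x :: pvStride rest
  | x :: _ => [x]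
  | [] => []

theorem pvStride_core {α : Type} (ys : List α) :
    List.filterMap (fun j => ys[4 * j]?) (List.range ((ys.length + 3) / 4)) = pvStride ys := by
  match ys with
  | [] => simp [pvStride]
  | [x] => simp [pvStride, List.range_succ]
  | [x, a] => simp [pvStride, List.range_succ]
  | [x, a, b] => simp [pvStride, List.range_succ]
  | x :: a :: b :: c :: rest =>
    have hn : (x :: a :: b :: c :: rest).length + 3 = (rest.length + 3) + 4 := by
      simp
    rw [hn, Nat.add_div_right _ (by omega), List.range_succ_eq_map, List.filterMap_cons,
        List.filterMap_map]
    have h0 : (x :: a :: b :: c :: rest)[4 * 0]? = some x := rfl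
    rw [h0]
    have hf : (fun j => (x :: a :: b :: c :: rest)[4 * j]?) ∘ Nat.succ
        = fun j => rest[4 * j]? := by
      funext j
      simp only [Function.comp]
      have : 4 * Nat.succ j = 4 + 4 * j := by omega
      rw [this, show (4 : Nat) + 4 * j = 4 + 4 * j from rfl, ← List.getElem?_drop]
      rfl
    rw [hf, pvStride_core rest]
    rfl
termination_by ys.length

theorem pvCol_eq (parts : List String) (k : Nat) :
    pvCol parts (k : Int) = pvStride (parts.drop k) := by
  unfold pvCol PySem.List.slice? PySem.List.sliceIndices
  simp only [if_neg (by norm_num : ¬ (4:Int) = 0), if_neg (by norm_num : ¬ (4:Int) < 0)]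
  set n := parts.length with hn
  simp only [if_neg (show ¬ ((k:Int) < 0) by omega), if_pos (show (0:Int) < 4 by norm_num)]
  by_cases h : k ≤ n
  · have hmin : min (k:Int) (n:Int) = (k:Int) := by omega
    rw [hmin]
    have hcount : (if (k:Int) < (n:Int) then (((n:Int) - (k:Int) + 4 - 1) / 4).toNat else 0)
        = ((n - k) + 3) / 4 := by
      split
      · have h3 : ((n:Int) - (k:Int) + 4 - 1) = (((n - k + 3 : Nat)) : Int) := by push_cast; omega
        rw [h3, show ((4:Int)) = ((4:Nat):Int) from rfl, ← Int.natCast_div, Int.toNat_natCast]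
      · omega
    have hfun : (fun x : Nat => parts[((k:Int) + 4 * (x:Int)).toNat]?)
        = fun x : Nat => (parts.drop k)[4 * x]? := by
      funext x
      have hx : ((k:Int) + 4 * (x:Int)).toNat = k + 4 * x := by omega
      rw [hx, ← List.getElem?_drop]
    rw [hcount, hfun]
    have hlen : n - k = (parts.drop k).length := by simp [hn]
    rw [hlen, Option.getD_some]
    exact pvStride_core _
  · have hmin : min (k:Int) (n:Int) = (n:Int) := by omega
    rw [hmin, if_neg (lt_irrefl _)]
    have hdrop : parts.drop k = [] := List.drop_eq_nil_of_le (by omega)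
    simp [hdrop, pvStride]

-- grouping view of A's loop
def pvChunk4 : List String → List (List (String × String))
  | n :: nm :: org :: vv :: rest =>
      [("number", n), ("name", nm), ("organization", org), ("versionView", vv)] :: pvChunk4 rest
  | _ => []

theorem pvCol_eq0 (parts : List String) : pvCol parts 0 = pvStride parts := by
  simpa using pvCol_eq parts 0
theorem pvCol_eq1 (parts : List String) : pvCol parts 1 = pvStride (parts.drop 1) := by
  exact_mod_cast pvCol_eq parts 1
theorem pvCol_eq2 (parts : List String) : pvCol parts 2 = pvStride (parts.drop 2) := by
  exact_mod_cast pvCol_eq parts 2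
theorem pvCol_eq3 (parts : List String) : pvCol parts 3 = pvStride (parts.drop 3) := by
  exact_mod_cast pvCol_eq parts 3

theorem pvALoop_eq (rest pre : List String) (acc : List (List (String × String))) :
    pvALoop (pre ++ rest) pre.length acc = acc ++ pvChunk4 rest := by
  match rest with
  | n :: nm :: org :: vv :: rest' =>
    rw [pvALoop]
    have hlen : pre.length + 3 < (pre ++ n :: nm :: org :: vv :: rest').length := by
      simp only [List.length_append, List.length_cons]; omega
    have hget : ∀ (k : Nat) (l : List String),
        (pre ++ l).getD (pre.length + k) "" = l.getD k "" := by
      intro k l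
      simp [List.getD, List.getElem?_append_right (Nat.le_add_right pre.length k)]
    have e0 : (pre ++ n :: nm :: org :: vv :: rest').getD pre.length "" = n := by
      rw [← Nat.add_zero pre.length, hget]; rfl
    have e1 : (pre ++ n :: nm :: org :: vv :: rest').getD (pre.length + 1) "" = nm := by
      rw [hget]; rfl
    have e2 : (pre ++ n :: nm :: org :: vv :: rest').getD (pre.length + 2) "" = org := by
      rw [hget]; rfl
    have e3 : (pre ++ n :: nm :: org :: vv :: rest').getD (pre.length + 3) "" = vv := by
      rw [hget]; rfl
    have hrec : pre ++ n :: nm :: org :: vv :: rest'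
        = (pre ++ [n, nm, org, vv]) ++ rest' := by simp
    have hl4 : pre.length + 4 = (pre ++ [n, nm, org, vv]).length := by
      simp
    rw [if_pos hlen, e0, e1, e2, e3]
    rw [hrec, hl4, pvALoop_eq rest' (pre ++ [n, nm, org, vv])]
    simp [pvChunk4]
  | [] => rw [pvALoop]; simp [pvChunk4]
  | [a] => rw [pvALoop]; simp [pvChunk4]
  | [a, b] => rw [pvALoop]; simp [pvChunk4]
  | [a, b, c] => rw [pvALoop]; simp [pvChunk4]
termination_by rest.length

-- dropping k < 4 elements of a 4-or-longer list commutes with pvStride as 'head of column k'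
theorem pvStride_drop (a b c d : String) (rest : List String) (k : Nat) (hk : k < 4) :
    pvStride ((a :: b :: c :: d :: rest).drop k)
      = [a, b, c, d].getD k "" :: pvStride (rest.drop k) := by
  interval_cases k <;>
    (match rest with
     | [] => rfl
     | [_] => rfl
     | [_, _] => rfl
     | _ :: _ :: _ :: _ => rfl)

theorem pvZip4_stride (xs : List String) :
    (pvZip4 (pvStride xs) (pvStride (xs.drop 1)) (pvStride (xs.drop 2)) (pvStride (xs.drop 3))).map
      (fun t => [("number", t.1), ("name", t.2.1), ("organization", t.2.2.1), ("versionView", t.2.2.2)])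
    = pvChunk4 xs := by
  match xs with
  | a :: b :: c :: d :: rest =>
    rw [pvStride_drop a b c d rest 1 (by omega),
        pvStride_drop a b c d rest 2 (by omega), pvStride_drop a b c d rest 3 (by omega),
        show pvStride (a :: b :: c :: d :: rest) = a :: pvStride rest from rfl]
    rw [pvZip4, List.map_cons, pvZip4_stride rest]
    rfl
  | [] => rfl
  | [_] => rfl
  | [_, _] => rfl
  | [_, _, _] => rfl
termination_by xs.length

-- ===== VERDICT (by name: the statement is the Claim_ definition above) =====
theorem parse_downstream_entries_py_spec : Claim_equal_parse_downstream_entries_py := by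
  intro value _ hpre
  unfold Spec_parse_downstream_entries_py parse_downstream_entries_py parse_downstream_entries_py_alt
  split
  · rfl
  · obtain ⟨parts, hp⟩ := Option.ne_none_iff_exists'.mp hpre
    rw [hp]
    simp only
    rw [pvCol_eq0, pvCol_eq1, pvCol_eq2, pvCol_eq3, pvZip4_stride]
    simpa using pvALoop_eq (parts.map PySem.Str.strip) [] []
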